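-- pv_equiv track=rewrite | github.com/nitinjain-1buy/website | backend/risk_engine.py | _calculate_severity
-- ===== SOURCE A (Python) =====
-- from typing import Dict, List, Optional, Tuple
--
-- def _calculate_severity(categories: List[str]) -> int:
--     """Calculate severity component (0-35)"""
--     high_severity_cats = ["FACTORY_FAB_OUTAGE", "EXPORT_CONTROLS_SANCTIONS", "GEOPOLITICAL_CONFLICT"]
--     medium_severity_cats = ["SUPPLY_SHORTAGE", "TARIFF_TRADE_POLICY", "EOL_LIFECYCLE"]
--
--     if any(cat in high_severity_cats for cat in categories):
--         return 35
--     elif any(cat in medium_severity_cats for cat in categories):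
--         return 25
--     elif categories:
--         return 15
--     else:
--         return 5
-- ===== SOURCE B (Python) =====
-- from typing import Dict, List, Optional, Tuple
--
-- _HIGH = {"FACTORY_FAB_OUTAGE", "EXPORT_CONTROLS_SANCTIONS", "GEOPOLITICAL_CONFLICT"}
-- _MEDIUM = {"SUPPLY_SHORTAGE", "TARIFF_TRADE_POLICY", "EOL_LIFECYCLE"}
--
-- def _score(cat: str) -> int:
--     if cat in _HIGH:
--         return 35
--     if cat in _MEDIUM:
--         return 25
--     return 15
--
-- def _calculate_severity(categories: List[str]) -> int:
--     """Calculate severity component (0-35)"""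
--     return max((_score(cat) for cat in categories), default=5)
-- ===== Notes on version B (the rewrite author's own statement) =====
-- stated objective: idiomatic
-- what changed: Replaced the if/elif ladder of three separate any()-scans with a per-category score lookup against sets and a single max(..., default=5) pass.
import Mathlib
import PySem

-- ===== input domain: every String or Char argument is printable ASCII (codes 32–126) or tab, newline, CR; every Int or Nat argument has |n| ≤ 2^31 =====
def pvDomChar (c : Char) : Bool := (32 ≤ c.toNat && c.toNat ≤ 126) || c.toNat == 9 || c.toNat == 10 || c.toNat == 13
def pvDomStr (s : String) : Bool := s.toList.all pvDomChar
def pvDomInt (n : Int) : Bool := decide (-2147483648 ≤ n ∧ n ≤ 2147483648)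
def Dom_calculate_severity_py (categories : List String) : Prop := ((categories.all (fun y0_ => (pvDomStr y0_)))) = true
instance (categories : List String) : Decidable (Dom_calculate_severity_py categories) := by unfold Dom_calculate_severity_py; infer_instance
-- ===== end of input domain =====

-- ===== PORT A =====
-- B computes the same severity in one pass with a running max; return-value equivalence, no side effects.
def pvHighCats : List String := ["FACTORY_FAB_OUTAGE", "EXPORT_CONTROLS_SANCTIONS", "GEOPOLITICAL_CONFLICT"]
def pvMediumCats : List String := ["SUPPLY_SHORTAGE", "TARIFF_TRADE_POLICY", "EOL_LIFECYCLE"]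

def calculate_severity_py (categories : List String) : Int :=
  if categories.any (fun cat => pvHighCats.contains cat) then 35
  else if categories.any (fun cat => pvMediumCats.contains cat) then 25
  else if categories ≠ [] then 15
  else 5

-- ===== PORT B =====
def pvScore (cat : String) : Int :=
  if PySem.Set.contains (PySem.Set.ofList pvHighCats) cat then 35
  else if PySem.Set.contains (PySem.Set.ofList pvMediumCats) cat then 25
  else 15

-- max(gen, default=5): none on the empty iterable gives the default
def calculate_severity_py_alt (categories : List String) : Int :=
  match PySem.List.max? (categories.map pvScore) (fun y => y) with
  | none => 5
  | some m => m

-- ===== PRECONDITION & SPEC =====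
def Spec_calculate_severity_py (categories : List String) (out : Int) : Prop := out = calculate_severity_py_alt categories
instance (categories : List String) (out : Int) : Decidable (Spec_calculate_severity_py categories out) := by unfold Spec_calculate_severity_py; infer_instance

-- ===== CLAIM (what is proved, stated in full; the proofs are below) =====
def Claim_equal_calculate_severity_py : Prop := ∀ (categories : List String), Dom_calculate_severity_py categories → Spec_calculate_severity_py categories (calculate_severity_py categories)

-- ===== LEMMAS AND PROOFS =====

theorem pv_ofList_high : PySem.Set.ofList pvHighCats = pvHighCats := by decide

theorem pv_ofList_medium : PySem.Set.ofList pvMediumCats = pvMediumCats := by decide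

theorem pv_score_eq (c : String) :
    pvScore c = if pvHighCats.contains c then 35 else if pvMediumCats.contains c then (25 : Int) else 15 := by
  simp [pvScore, pv_ofList_high, pv_ofList_medium, PySem.Set.contains]

theorem pv_score_ge (c : String) : (15 : Int) ≤ pvScore c := by
  rw [pv_score_eq]; split_ifs <;> norm_num

theorem pv_fold_char (t : List String) (a : Int) (ha : 15 ≤ a) :
    (t.map pvScore).foldl max a =
      max a (if t.any (fun cat => pvHighCats.contains cat) then 35
             else if t.any (fun cat => pvMediumCats.contains cat) then 25 else 15) := by
  induction t generalizing a with
  | nil => simp [max_def]; omega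
  | cons c t ih =>
      simp only [List.map_cons, List.foldl_cons, List.any_cons]
      rw [ih (max a (pvScore c)) (le_trans (pv_score_ge c) (le_max_right a (pvScore c)))]
      rw [pv_score_eq c]
      rcases Bool.dichotomy (pvHighCats.contains c) with h1 | h1 <;>
        rcases Bool.dichotomy (pvMediumCats.contains c) with h2 | h2 <;>
          rcases Bool.dichotomy (t.any (fun cat => pvHighCats.contains cat)) with h3 | h3 <;>
            rcases Bool.dichotomy (t.any (fun cat => pvMediumCats.contains cat)) with h4 | h4 <;>
              simp only [h1, h2, h3, h4, Bool.false_or, Bool.true_or, if_true, if_false,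
                Bool.false_eq_true, max_def] <;> split_ifs <;> omega

theorem pv_key : ∀ (categories : List String),
    calculate_severity_py categories = calculate_severity_py_alt categories := by
  intro categories
  cases categories with
  | nil => decide
  | cons h t =>
      unfold calculate_severity_py calculate_severity_py_alt
      simp only [List.map_cons, PySem.List.max?_id_cons]
      rw [pv_fold_char t (pvScore h) (pv_score_ge h)]
      rw [pv_score_eq h]
      simp only [List.any_cons]
      rcases Bool.dichotomy (pvHighCats.contains h) with h1 | h1 <;>
        rcases Bool.dichotomy (pvMediumCats.contains h) with h2 | h2 <;>
          rcases Bool.dichotomy (t.any (fun cat => pvHighCats.contains cat)) with h3 | h3 <;>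
            rcases Bool.dichotomy (t.any (fun cat => pvMediumCats.contains cat)) with h4 | h4 <;>
              simp only [h1, h2, h3, h4, Bool.false_or, Bool.true_or, if_true, if_false,
                Bool.false_eq_true, max_def, ne_eq, List.cons_ne_nil,
                not_false_eq_true, ite_true, ite_false] <;>
                split_ifs <;> omega

-- ===== VERDICT (by name: the statement is the Claim_ definition above) =====
theorem calculate_severity_py_spec : Claim_equal_calculate_severity_py := by
  intro categories _
  unfold Spec_calculate_severity_py
  exact pv_key categories
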